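-- pv_equiv track=rewrite | github.com/pypi-data/pypi-mirror-399 | packages/janus-quantum/janus_quantum-1.0.1-py3-none-any.whl/janus/encode/efficient_sparse.py | _maximizing_difference_bit_search
-- ===== SOURCE A (Python) =====
-- from typing import Union, List, Dict, Tuple, Optional
--
-- def _maximizing_difference_bit_search(
--     b_strings: List[str], dif_qubits: List[int]
-- ) -> Tuple[int, List[str], List[str]]:
--     """寻找最大化集合差异的比特位"""
--     bit_index = 0
--     set_difference = -1
--     t0_res, t1_res = [], []
--
--     n_bits = len(b_strings[0])
--     bit_search_space = [i for i in range(n_bits) if i not in dif_qubits]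
--
--     for bit in bit_search_space:
--         temp_t0 = [s for s in b_strings if s[bit] == "0"]
--         temp_t1 = [s for s in b_strings if s[bit] == "1"]
--
--         if temp_t0 and temp_t1:
--             temp_difference = abs(len(temp_t0) - len(temp_t1))
--             if set_difference == -1 or temp_difference > set_difference:
--                 t0_res, t1_res = temp_t0, temp_t1
--                 bit_index = bit
--                 set_difference = temp_difference
--
--     return bit_index, t0_res, t1_res
-- ===== SOURCE B (Python) =====
-- def _maximizing_difference_bit_search(b_strings, dif_qubits):
--     n_bits = len(b_strings[0])
--     search_space = [i for i in range(n_bits) if i not in dif_qubits]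
--
--     # One pass over the data: per-position tallies of '0's and '1's.
--     zeros, ones = {}, {}
--     for s in b_strings:
--         for i in search_space:
--             c = s[i]
--             if c == "0":
--                 zeros[i] = zeros.get(i, 0) + 1
--             elif c == "1":
--                 ones[i] = ones.get(i, 0) + 1
--
--     candidates = [i for i in search_space
--                   if zeros.get(i, 0) > 0 and ones.get(i, 0) > 0]
--     if not candidates:
--         return 0, [], []
--     best = max(candidates, key=lambda i: abs(zeros[i] - ones[i]))
--     t0 = [s for s in b_strings if s[best] == "0"]
--     t1 = [s for s in b_strings if s[best] == "1"]
--     return best, t0, t1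
-- ===== Notes on version B (the rewrite author's own statement) =====
-- stated objective: alternative
-- what changed: B inverts the loop nesting: one pass over the strings builds per-position '0'/'1' tally dictionaries (so A's inner scan of b_strings for every candidate bit disappears), the winning bit is then chosen with max(candidates, key=...), and the two partitions are materialized once for that single bit.
import Mathlib
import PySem

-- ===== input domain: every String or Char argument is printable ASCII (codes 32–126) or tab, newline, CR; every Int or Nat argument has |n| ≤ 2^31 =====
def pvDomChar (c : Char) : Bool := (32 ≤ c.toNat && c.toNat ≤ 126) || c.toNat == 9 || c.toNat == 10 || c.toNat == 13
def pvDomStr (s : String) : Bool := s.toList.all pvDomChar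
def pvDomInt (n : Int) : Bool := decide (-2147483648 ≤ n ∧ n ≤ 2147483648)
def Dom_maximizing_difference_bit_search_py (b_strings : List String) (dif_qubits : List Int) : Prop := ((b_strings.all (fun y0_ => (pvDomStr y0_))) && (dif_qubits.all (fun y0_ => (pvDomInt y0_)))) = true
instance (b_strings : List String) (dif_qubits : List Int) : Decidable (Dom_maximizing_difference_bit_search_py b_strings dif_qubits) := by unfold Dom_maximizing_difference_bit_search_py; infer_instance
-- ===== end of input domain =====

-- B inverts the loop nesting of A: ONE pass over the strings builds per-position '0'/'1' tally
-- dicts (A's inner scan of b_strings per candidate bit disappears), the winner is picked with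
-- max(candidates, key=...), and the partitions are built once for that bit ("alternative").

-- ===== PORT A =====
-- A's loop state (bit_index, set_difference, t0_res, t1_res); one step of A's for-loop.
def pvAstep (bs : List String) (st : Int × Int × List String × List String) (bit : Int) :
    Int × Int × List String × List String :=
  let temp_t0 := bs.filter (fun s => PySem.Str.pyGet? s bit == some '0')
  let temp_t1 := bs.filter (fun s => PySem.Str.pyGet? s bit == some '1')
  if temp_t0 ≠ [] ∧ temp_t1 ≠ [] then
    let d : Int := |(temp_t0.length : Int) - (temp_t1.length : Int)|
    if st.2.1 = -1 ∨ d > st.2.1 then (bit, d, temp_t0, temp_t1) else st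
  else st

def maximizing_difference_bit_search_py (b_strings : List String) (dif_qubits : List Int) :
    Int × List String × List String :=
  let n_bits : Int := PySem.Str.len (PySem.List.pyGetD b_strings 0 "")
  let bit_search_space :=
    (PySem.List.pyRange 0 n_bits 1).filter (fun i => !(dif_qubits.contains i))
  let r := bit_search_space.foldl (pvAstep b_strings) (0, -1, [], [])
  (r.1, r.2.2)

-- ===== PORT B =====
-- inner loop of the tally pass: for one string s, bump zeros/ones at each searched position
def pvTally (search : List Int) (p : PySem.Dict Int Int × PySem.Dict Int Int) (s : String) :
    PySem.Dict Int Int × PySem.Dict Int Int :=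
  search.foldl (fun q i =>
    let c := PySem.Str.pyGet? s i
    if c == some '0' then (q.1.insert i (q.1.getD i 0 + 1), q.2)
    else if c == some '1' then (q.1, q.2.insert i (q.2.getD i 0 + 1))
    else q) p

def maximizing_difference_bit_search_py_alt (b_strings : List String) (dif_qubits : List Int) :
    Int × List String × List String :=
  let n_bits : Int := PySem.Str.len (PySem.List.pyGetD b_strings 0 "")
  let search := (PySem.List.pyRange 0 n_bits 1).filter (fun i => !(dif_qubits.contains i))
  let zo := b_strings.foldl (pvTally search) (⟨[]⟩, ⟨[]⟩)
  let candidates := search.filter (fun i => zo.1.getD i 0 > 0 && zo.2.getD i 0 > 0)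
  match PySem.List.max? candidates (fun i => |zo.1.getD i 0 - zo.2.getD i 0|) with
  | none => (0, [], [])
  | some best =>
      (best,
       b_strings.filter (fun s => PySem.Str.pyGet? s best == some '0'),
       b_strings.filter (fun s => PySem.Str.pyGet? s best == some '1'))

-- ===== PRECONDITION & SPEC =====
-- Pre_ excludes exactly the inputs where Python A raises IndexError: empty b_strings
-- (b_strings[0]), or some searched bit position out of range for some string (s[bit]).
def Pre_maximizing_difference_bit_search_py (b_strings : List String) (dif_qubits : List Int) : Prop :=
  b_strings ≠ [] ∧
  ∀ i ∈ PySem.List.pyRange 0 (PySem.Str.len (PySem.List.pyGetD b_strings 0 "")) 1,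
    dif_qubits.contains i = false → ∀ s ∈ b_strings, i < PySem.Str.len s

instance (b_strings : List String) (dif_qubits : List Int) : Decidable (Pre_maximizing_difference_bit_search_py b_strings dif_qubits) := by unfold Pre_maximizing_difference_bit_search_py; infer_instance

def pvWitness_maximizing_difference_bit_search_py : List String × List Int := (["01", "10"], [])

def Spec_maximizing_difference_bit_search_py (b_strings : List String) (dif_qubits : List Int) (out : Int × List String × List String) : Prop := out = maximizing_difference_bit_search_py_alt b_strings dif_qubits
instance (b_strings : List String) (dif_qubits : List Int) (out : Int × List String × List String) : Decidable (Spec_maximizing_difference_bit_search_py b_strings dif_qubits out) := by unfold Spec_maximizing_difference_bit_search_py; infer_instance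

-- ===== CLAIM (what is proved, stated in full; the proofs are below) =====
def Claim_equal_maximizing_difference_bit_search_py : Prop := ∀ (b_strings : List String) (dif_qubits : List Int), Dom_maximizing_difference_bit_search_py b_strings dif_qubits → Pre_maximizing_difference_bit_search_py b_strings dif_qubits → Spec_maximizing_difference_bit_search_py b_strings dif_qubits (maximizing_difference_bit_search_py b_strings dif_qubits)

-- ===== LEMMAS AND PROOFS =====
def pvF0 (bs : List String) (bit : Int) : List String :=
  bs.filter (fun s => PySem.Str.pyGet? s bit == some '0')
def pvF1 (bs : List String) (bit : Int) : List String :=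
  bs.filter (fun s => PySem.Str.pyGet? s bit == some '1')

-- bump the tally dict at position i if s has character c there
def pvBump (c : Char) (s : String) (z : PySem.Dict Int Int) (i : Int) : PySem.Dict Int Int :=
  if PySem.Str.pyGet? s i == some c then z.insert i (z.getD i 0 + 1) else z

-- the pair-valued tally fold is the two independent single-dict folds
lemma pvTally_proj (s : String) (I : List Int) (z o : PySem.Dict Int Int) :
    pvTally I (z, o) s = (I.foldl (pvBump '0' s) z, I.foldl (pvBump '1' s) o) := by
  induction I generalizing z o with
  | nil => rfl
  | cons i t ih =>
    have hstep : pvTally (i :: t) (z, o) s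
        = pvTally t (pvBump '0' s z i, pvBump '1' s o i) s := by
      simp only [pvTally, List.foldl_cons]
      congr 1
      unfold pvBump
      by_cases h0 : PySem.List.pyGet? s.toList i = some '0'
      · have h1 : ¬ PySem.List.pyGet? s.toList i = some '1' := by rw [h0]; decide
        simp [PySem.Str.pyGet?, h0, h1]
      · by_cases h1 : PySem.List.pyGet? s.toList i = some '1'
        · simp [PySem.Str.pyGet?, h0, h1]
        · simp [PySem.Str.pyGet?, h0, h1]
    rw [hstep, ih]
    simp [List.foldl_cons]

lemma pvBump_fold_getD (c : Char) (s : String) (I : List Int) (hI : I.Nodup)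
    (z : PySem.Dict Int Int) (k : Int) :
    (I.foldl (pvBump c s) z).getD k 0
      = z.getD k 0 + (if k ∈ I ∧ PySem.Str.pyGet? s k = some c then 1 else 0) := by
  induction I generalizing z with
  | nil => simp
  | cons i t ih =>
    have hnd := List.nodup_cons.mp hI
    simp only [List.foldl_cons]
    rw [ih hnd.2]
    have hb : (pvBump c s z i).getD k 0
        = z.getD k 0 + (if k = i ∧ PySem.Str.pyGet? s i = some c then 1 else 0) := by
      unfold pvBump
      by_cases hc : PySem.Str.pyGet? s i = some c
      · rw [if_pos (beq_iff_eq.mpr hc), PySem.Dict.getD_insert]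
        by_cases hk : k = i
        · subst hk
          rw [if_pos rfl, if_pos ⟨rfl, hc⟩]
        · rw [if_neg hk, if_neg (fun h => hk h.1), add_zero]
      · rw [if_neg (fun h => hc (beq_iff_eq.mp h)), if_neg (fun h => hc h.2), add_zero]
    rw [hb]
    by_cases hk : k = i
    · subst hk
      have hkt : ¬ (k ∈ t ∧ PySem.Str.pyGet? s k = some c) := fun h => hnd.1 h.1
      rw [if_neg hkt, add_zero]
      by_cases hc : PySem.Str.pyGet? s k = some c
      · rw [if_pos ⟨rfl, hc⟩, if_pos ⟨List.mem_cons_self, hc⟩]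
      · rw [if_neg (fun h => hc h.2), if_neg (fun h => hc h.2)]
    · have h3 : (k ∈ i :: t ∧ PySem.Str.pyGet? s k = some c)
             ↔ (k ∈ t ∧ PySem.Str.pyGet? s k = some c) := by
        simp [List.mem_cons, hk]
      have h4 : ¬ (k = i ∧ PySem.Str.pyGet? s i = some c) := fun h => hk h.1
      rw [if_neg h4, add_zero, if_congr h3 rfl rfl]

-- outer tally pass: the dicts hold exactly the per-position counts, for searched positions
lemma pvTally_fold_getD (bs : List String) (I : List Int) (hI : I.Nodup)
    (z o : PySem.Dict Int Int) (k : Int) (hk : k ∈ I) :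
    (bs.foldl (pvTally I) (z, o)).1.getD k 0 = z.getD k 0 + ((pvF0 bs k).length : Int) ∧
    (bs.foldl (pvTally I) (z, o)).2.getD k 0 = o.getD k 0 + ((pvF1 bs k).length : Int) := by
  induction bs generalizing z o with
  | nil => simp [pvF0, pvF1]
  | cons s t ih =>
    simp only [List.foldl_cons, pvTally_proj]
    rcases ih (I.foldl (pvBump '0' s) z) (I.foldl (pvBump '1' s) o) with ⟨h1, h2⟩
    rw [h1, h2, pvBump_fold_getD '0' s I hI z k, pvBump_fold_getD '1' s I hI o k]
    simp only [pvF0, pvF1, List.filter_cons, beq_iff_eq, hk, true_and]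
    constructor
    · by_cases hc : PySem.Str.pyGet? s k = some '0' <;>
        simp [PySem.Str.pyGet?] at hc <;> simp [hc] <;> push_cast <;> ring
    · by_cases hc : PySem.Str.pyGet? s k = some '1' <;>
        simp [PySem.Str.pyGet?] at hc <;> simp [hc] <;> push_cast <;> ring

-- A-side: represent A's loop state from a (best_bit, best_diff) pair
def pvRep (bs : List String) (st : Int × Int) : Int × Int × List String × List String :=
  (st.1, st.2, if st.2 = -1 then [] else pvF0 bs st.1, if st.2 = -1 then [] else pvF1 bs st.1)

def pvSel (bs : List String) (st : Int × Int) (i : Int) : Int × Int :=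
  if pvF0 bs i ≠ [] ∧ pvF1 bs i ≠ [] then
    let d : Int := |((pvF0 bs i).length : Int) - ((pvF1 bs i).length : Int)|
    if st.2 = -1 ∨ d > st.2 then (i, d) else st
  else st

lemma pvStep_comm (bs : List String) (st : Int × Int) (bit : Int) :
    pvAstep bs (pvRep bs st) bit = pvRep bs (pvSel bs st bit) := by
  simp only [pvAstep, pvSel]
  set t0 := pvF0 bs bit with ht0
  set t1 := pvF1 bs bit with ht1
  have hte : bs.filter (fun s => PySem.Str.pyGet? s bit == some '0') = t0 := rfl
  have hte1 : bs.filter (fun s => PySem.Str.pyGet? s bit == some '1') = t1 := rfl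
  rw [hte, hte1]
  by_cases hP : t0 ≠ [] ∧ t1 ≠ []
  · rw [if_pos hP, if_pos hP]
    have hst : (pvRep bs st).2.1 = st.2 := rfl
    rw [hst]
    by_cases hup : st.2 = -1 ∨ |(t0.length : Int) - (t1.length : Int)| > st.2
    · rw [if_pos hup, if_pos hup]
      have hd : ¬ (|(t0.length : Int) - (t1.length : Int)| = -1) := by
        have := abs_nonneg ((t0.length : Int) - (t1.length : Int))
        omega
      simp [pvRep, hd, ← ht0, ← ht1]
    · rw [if_neg hup, if_neg hup]
  · rw [if_neg hP, if_neg hP]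

lemma pvFold_comm (bs : List String) (L : List Int) (st : Int × Int) :
    L.foldl (pvAstep bs) (pvRep bs st) = pvRep bs (L.foldl (pvSel bs) st) := by
  induction L generalizing st with
  | nil => rfl
  | cons i t ih =>
    simp only [List.foldl_cons]
    rw [pvStep_comm bs st i]
    exact ih _

-- pvSel skips invalid bits: the fold factors through the candidate filter
lemma pvSel_filter (bs : List String) (L : List Int) (st : Int × Int) :
    L.foldl (pvSel bs) st
      = (L.filter (fun i => decide (0 < ((pvF0 bs i).length : Int))
                            && decide (0 < ((pvF1 bs i).length : Int)))).foldl (pvSel bs) st := by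
  induction L generalizing st with
  | nil => rfl
  | cons i t ih =>
    simp only [List.filter_cons, List.foldl_cons]
    by_cases hv : 0 < ((pvF0 bs i).length : Int) ∧ 0 < ((pvF1 bs i).length : Int)
    · rw [if_pos (by simp only [Bool.and_eq_true, decide_eq_true_eq]; exact hv),
          List.foldl_cons, ih]
    · have h0 : ¬ (pvF0 bs i ≠ [] ∧ pvF1 bs i ≠ []) := by
        intro hc
        exact hv ⟨by exact_mod_cast List.length_pos_of_ne_nil hc.1,
                  by exact_mod_cast List.length_pos_of_ne_nil hc.2⟩
      have hs : pvSel bs st i = st := by simp only [pvSel, if_neg h0]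
      have hfalse : (decide (0 < ((pvF0 bs i).length : Int))
                     && decide (0 < ((pvF1 bs i).length : Int))) ≠ true := by
        intro h
        rcases Bool.and_eq_true_iff.mp h with ⟨h1, h2⟩
        exact hv ⟨of_decide_eq_true h1, of_decide_eq_true h2⟩
      rw [if_neg hfalse, hs, ih]

-- max(..., key=...) only looks at keys of list members
lemma pvMaxFold_congr {a : Type} (l : List a) (k1 k2 : a -> Int)
    (h : forall x, x ∈ l -> k1 x = k2 x) (acc : Option a)
    (hacc : forall m, acc = some m -> k1 m = k2 m) :
    l.foldl (fun acc x => match acc with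
      | none => some x
      | some m => if k1 m < k1 x then some x else some m) acc
    = l.foldl (fun acc x => match acc with
      | none => some x
      | some m => if k2 m < k2 x then some x else some m) acc := by
  induction l generalizing acc with
  | nil => rfl
  | cons x t ih =>
    simp only [List.foldl_cons]
    have hx := h x (by simp)
    have ht : forall y, y ∈ t -> k1 y = k2 y := fun y hy => h y (by simp [hy])
    cases acc with
    | none =>
      exact ih ht (some x) (fun m hm => by cases hm; exact hx)
    | some m' =>
      have hstep : (match some m' with
          | none => some x
          | (some m : Option a) => if k1 m < k1 x then some x else some m)
          = if k2 m' < k2 x then some x else some m' := by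
        show (if k1 m' < k1 x then some x else some m') = _
        rw [hacc m' rfl, hx]
      rw [hstep]
      refine ih ht (if k2 m' < k2 x then some x else some m') (fun m hm => ?_)
      by_cases hlt : k2 m' < k2 x
      · rw [if_pos hlt] at hm
        cases hm
        exact hx
      · rw [if_neg hlt] at hm
        cases hm
        exact hacc m' rfl

lemma pvMax_congr {a : Type} (l : List a) (k1 k2 : a -> Int)
    (h : forall x, x ∈ l -> k1 x = k2 x) :
    PySem.List.max? l k1 = PySem.List.max? l k2 := by
  unfold PySem.List.max?
  exact pvMaxFold_congr l k1 k2 h none (fun m hm => by cases hm)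

-- on candidate bits, the selection fold is Python's max(..., key=...) running fold
def pvKey (bs : List String) (i : Int) : Int :=
  |((pvF0 bs i).length : Int) - ((pvF1 bs i).length : Int)|

def pvG (bs : List String) : Option Int → Int × Int
  | none => (0, -1)
  | some m => (m, pvKey bs m)

lemma pvSel_max_step (bs : List String) (acc : Option Int) (i : Int)
    (hv : pvF0 bs i ≠ [] ∧ pvF1 bs i ≠ []) :
    pvSel bs (pvG bs acc) i
      = pvG bs (match acc with
                | none => some i
                | some m => if pvKey bs m < pvKey bs i then some i else some m) := by
  have hki : |((pvF0 bs i).length : Int) - ((pvF1 bs i).length : Int)| = pvKey bs i := rfl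
  cases acc with
  | none =>
    show pvSel bs (0, -1) i = pvG bs (some i)
    simp only [pvSel, if_pos hv]
    rw [hki, if_pos (Or.inl trivial)]
    rfl
  | some m =>
    show pvSel bs (m, pvKey bs m) i
        = pvG bs (if pvKey bs m < pvKey bs i then some i else some m)
    have hnn : (0 : Int) ≤ pvKey bs m := abs_nonneg _
    simp only [pvSel, if_pos hv]
    rw [hki]
    by_cases hlt : pvKey bs m < pvKey bs i
    · rw [if_pos (Or.inr hlt), if_pos hlt]
      rfl
    · have hne : ¬ ((m, pvKey bs m).2 = -1 ∨ pvKey bs i > (m, pvKey bs m).2) := by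
        rintro (h | h)
        · simp only at h
          omega
        · exact hlt h
      rw [if_neg hne, if_neg hlt]
      rfl

lemma pvSel_max_fold (bs : List String) (C : List Int)
    (hC : ∀ i ∈ C, pvF0 bs i ≠ [] ∧ pvF1 bs i ≠ []) (acc : Option Int) :
    C.foldl (pvSel bs) (pvG bs acc)
      = pvG bs (C.foldl (fun a x => match a with
          | none => some x
          | some m => if pvKey bs m < pvKey bs x then some x else some m) acc) := by
  induction C generalizing acc with
  | nil => rfl
  | cons i t ih =>
    simp only [List.foldl_cons]
    rw [pvSel_max_step bs acc i (hC i (by simp))]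
    exact ih (fun j hj => hC j (by simp [hj])) _

-- ===== VERDICT (by name: the statement is the Claim_ definition above) =====
set_option maxHeartbeats 1000000 in
theorem maximizing_difference_bit_search_py_spec : Claim_equal_maximizing_difference_bit_search_py := by
  intro bs dq _ _
  unfold Spec_maximizing_difference_bit_search_py
  simp only [maximizing_difference_bit_search_py, maximizing_difference_bit_search_py_alt]
  set n : Int := PySem.Str.len (PySem.List.pyGetD bs 0 "") with hn
  set L := (PySem.List.pyRange 0 n 1).filter (fun i => !(dq.contains i)) with hL
  have hLnd : L.Nodup := (PySem.List.nodup_pyRange_one 0 n).filter _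
  -- the tally dicts
  set zo := bs.foldl (pvTally L) ((⟨[]⟩ : PySem.Dict Int Int), (⟨[]⟩ : PySem.Dict Int Int)) with hzo
  have hget : ∀ k ∈ L, zo.1.getD k 0 = ((pvF0 bs k).length : Int)
            ∧ zo.2.getD k 0 = ((pvF1 bs k).length : Int) := by
    intro k hk
    have := pvTally_fold_getD bs L hLnd ⟨[]⟩ ⟨[]⟩ k hk
    have he : (⟨[]⟩ : PySem.Dict Int Int).getD k 0 = 0 := rfl
    rw [he] at this
    simpa using this
  -- candidates agree
  have hcand : L.filter (fun i => zo.1.getD i 0 > 0 && zo.2.getD i 0 > 0)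
      = L.filter (fun i => decide (0 < ((pvF0 bs i).length : Int))
                           && decide (0 < ((pvF1 bs i).length : Int))) := by
    apply List.filter_congr
    intro i hi
    rw [(hget i hi).1, (hget i hi).2]
  set C := L.filter (fun i => decide (0 < ((pvF0 bs i).length : Int))
                              && decide (0 < ((pvF1 bs i).length : Int))) with hCdef
  have hCmem : ∀ i ∈ C, pvF0 bs i ≠ [] ∧ pvF1 bs i ≠ [] := by
    intro i hi
    have := (List.mem_filter.mp hi).2
    rcases Bool.and_eq_true_iff.mp this with ⟨h1, h2⟩
    exact ⟨List.ne_nil_of_length_pos (by exact_mod_cast of_decide_eq_true h1),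
           List.ne_nil_of_length_pos (by exact_mod_cast of_decide_eq_true h2)⟩
  -- the max? key agrees with pvKey on candidates
  have hkey : PySem.List.max? C (fun i => |zo.1.getD i 0 - zo.2.getD i 0|)
      = PySem.List.max? C (pvKey bs) := by
    apply pvMax_congr
    intro x hx
    have h := hget x (List.mem_filter.mp hx).1
    rw [h.1, h.2]
    rfl
  rw [hcand, hkey]
  -- A's fold, rewritten through the representation
  have hinit : ((0 : Int), (-1 : Int), ([] : List String), ([] : List String))
      = pvRep bs (pvG bs none) := by simp [pvRep, pvG]
  have hA : L.foldl (pvAstep bs) (0, -1, [], [])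
      = pvRep bs (pvG bs (PySem.List.max? C (pvKey bs))) := by
    rw [hinit, pvFold_comm, pvSel_filter bs L (pvG bs none), ← hCdef,
        pvSel_max_fold bs C hCmem none]
    unfold PySem.List.max?
    congr 2
    apply PySem.List.foldl_congr_mem
    intro a x hx
    cases a <;> rfl
  rw [hA]
  cases hmax : PySem.List.max? C (pvKey bs) with
  | none => simp [pvRep, pvG]
  | some best =>
    have hnn : (0 : Int) ≤ pvKey bs best := abs_nonneg _
    have hne : ¬ (pvKey bs best = -1) := by omega
    simp [pvRep, pvG, hne, pvF0, pvF1]
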